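-- pv_equiv track=rewrite | github.com/ProcyonDynamic/NAVSYS_MINI | modules/navwarn_mini/voyage_userchart_service.py | _extract_warning_sections
-- ===== SOURCE A (Python) =====
-- def _extract_warning_sections(lines: list[str]) -> dict[str, list[str]]:
--     sections: dict[str, list[str]] = {}
--
--     current_warning_id = ""
--     current_lines: list[str] = []
--     in_section = False
--
--     for line in lines:
--         stripped = line.strip()
--
--         if stripped.startswith("// [WARNING_ID:"):
--             if in_section and current_warning_id and current_lines:
--                 sections[current_warning_id] = current_lines[:]
--
--             current_warning_id = (
--                 stripped.replace("// [WARNING_ID:", "")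
--                 .replace("]", "")
--                 .strip()
--             )
--             current_lines = [line]
--             in_section = True
--             continue
--
--         if in_section:
--             current_lines.append(line)
--
--             if stripped == "// NNNN":
--                 if current_warning_id:
--                     sections[current_warning_id] = current_lines[:]
--                 current_warning_id = ""
--                 current_lines = []
--                 in_section = False
--
--     if in_section and current_warning_id and current_lines:
--         sections[current_warning_id] = current_lines[:]
--
--     return sections
-- ===== SOURCE B (Python) =====
-- def _extract_warning_sections(lines: list[str]) -> dict[str, list[str]]:
--     # Chunk-based decomposition: skip to each marker, grab its block with an
--     # inner loop (stop before the next marker, or just after a "// NNNN" line),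
--     # then record it; no in_section flag, no deferred flush.
--     sections: dict[str, list[str]] = {}
--     i, n = 0, len(lines)
--     while i < n:
--         header = lines[i]
--         i += 1
--         if not header.strip().startswith("// [WARNING_ID:"):
--             continue
--         body = [header]
--         while i < n and not lines[i].strip().startswith("// [WARNING_ID:"):
--             line = lines[i]
--             i += 1
--             body.append(line)
--             if line.strip() == "// NNNN":
--                 break
--         wid = (
--             header.strip()
--             .replace("// [WARNING_ID:", "")
--             .replace("]", "")
--             .strip()
--         )
--         if wid:
--             sections[wid] = body
--     return sections
-- ===== Notes on version B (the rewrite author's own statement) =====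
-- stated objective: alternative
-- what changed: Replaced A's single-pass state machine (in_section flag, deferred flush at the next marker or end) with a chunking decomposition: skip to each marker, collect its block with an inner loop that stops before the next marker or just after a '// NNNN' line, and record the block immediately.
import Mathlib
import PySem

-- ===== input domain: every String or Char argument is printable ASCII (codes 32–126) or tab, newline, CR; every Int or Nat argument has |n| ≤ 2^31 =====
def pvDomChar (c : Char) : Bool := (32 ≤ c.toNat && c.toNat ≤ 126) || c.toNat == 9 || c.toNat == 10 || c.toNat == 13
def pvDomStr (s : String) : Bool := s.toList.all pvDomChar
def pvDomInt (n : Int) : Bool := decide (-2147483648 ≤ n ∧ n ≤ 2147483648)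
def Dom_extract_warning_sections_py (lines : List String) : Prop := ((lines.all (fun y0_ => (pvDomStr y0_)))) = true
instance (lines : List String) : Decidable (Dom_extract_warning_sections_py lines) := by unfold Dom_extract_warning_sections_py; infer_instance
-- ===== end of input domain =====

-- B replaces A's single-pass state machine (in_section flag, deferred flush) by a chunking
-- decomposition: skip to each marker, grab its block with an inner scan, record it at once
-- (objective: alternative — same cost, plainer control flow).

-- ===== PORT A =====
-- loop body of A's single `for line in lines` loop; state = (sections, current_warning_id, current_lines, in_section)
def pvAStep (st : PySem.Dict String (List String) × String × List String × Bool) (line : String) :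
    PySem.Dict String (List String) × String × List String × Bool :=
  match st with
  | (sections, cw, cl, ins) =>
    let stripped := PySem.Str.strip line
    if PySem.Str.startswith stripped "// [WARNING_ID:" then
      let sections := if ins && cw != "" && !cl.isEmpty then sections.insert cw cl else sections
      (sections,
       PySem.Str.strip (PySem.Str.replace (PySem.Str.replace stripped "// [WARNING_ID:" "") "]" ""),
       [line], true)
    else if ins then
      let cl := cl ++ [line]
      if stripped == "// NNNN" then
        ((if cw != "" then sections.insert cw cl else sections), "", [], false)
      else (sections, cw, cl, true)
    else (sections, cw, cl, false)

-- A's trailing `if in_section and current_warning_id and current_lines: …; return sections`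
def pvAFinish (st : PySem.Dict String (List String) × String × List String × Bool) :
    List (String × List String) :=
  match st with
  | (sections, cw, cl, ins) =>
    (if ins && cw != "" && !cl.isEmpty then sections.insert cw cl else sections).items

def extract_warning_sections_py (lines : List String) : List (String × List String) :=
  pvAFinish (lines.foldl pvAStep (PySem.Dict.empty, "", [], false))

-- ===== PORT B =====
-- Source B's inner `while` loop (index advance rendered as consuming the suffix):
-- returns (body tail collected after the header, remaining lines)
def pvBBody : List String → List String × List String
  | [] => ([], [])
  | l :: ls =>
    if PySem.Str.startswith (PySem.Str.strip l) "// [WARNING_ID:" then ([], l :: ls)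
    else if PySem.Str.strip l == "// NNNN" then ([l], ls)
    else
      let br := pvBBody ls
      (l :: br.1, br.2)

theorem pvBBody_len (ls : List String) : (pvBBody ls).2.length ≤ ls.length := by
  induction ls with
  | nil => simp [pvBBody]
  | cons l ls ih =>
    simp only [pvBBody]
    split_ifs <;> simp <;> omega -- each branch: reduce then arithmetic

-- Source B's outer `while rest:` loop
def pvBOuter : List String → PySem.Dict String (List String) → PySem.Dict String (List String)
  | [], sections => sections
  | header :: rest, sections =>
    if PySem.Str.startswith (PySem.Str.strip header) "// [WARNING_ID:" then
      let br := pvBBody rest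
      let wid := PySem.Str.strip (PySem.Str.replace
        (PySem.Str.replace (PySem.Str.strip header) "// [WARNING_ID:" "") "]" "")
      pvBOuter br.2 (if wid != "" then sections.insert wid (header :: br.1) else sections)
    else pvBOuter rest sections
  termination_by ls _ => ls.length
  decreasing_by
  · have := pvBBody_len rest; simp at *; omega
  · simp

def extract_warning_sections_py_alt (lines : List String) : List (String × List String) :=
  (pvBOuter lines PySem.Dict.empty).items

-- ===== PRECONDITION & SPEC =====
def Spec_extract_warning_sections_py (lines : List String) (out : List (String × List String)) : Prop := out = extract_warning_sections_py_alt lines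
instance (lines : List String) (out : List (String × List String)) : Decidable (Spec_extract_warning_sections_py lines out) := by unfold Spec_extract_warning_sections_py; infer_instance

-- ===== CLAIM (what is proved, stated in full; the proofs are below) =====
def Claim_equal_extract_warning_sections_py : Prop := ∀ (lines : List String), Dom_extract_warning_sections_py lines → Spec_extract_warning_sections_py lines (extract_warning_sections_py lines)

-- ===== LEMMAS AND PROOFS =====

-- the joint loop invariant: A's fold from the skipping state equals B's outer loop, and
-- A's fold from an in-section state equals B's outer loop after the current block is closed
theorem pvBBody_marker (l : String) (ls : List String)
    (h : PySem.Str.startswith (PySem.Str.strip l) "// [WARNING_ID:" = true) :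
    pvBBody (l :: ls) = ([], l :: ls) := by
  simp only [pvBBody]; rw [if_pos h]

theorem pvBBody_nnnn (l : String) (ls : List String)
    (hm : ¬ PySem.Str.startswith (PySem.Str.strip l) "// [WARNING_ID:" = true)
    (hn : PySem.Str.strip l = "// NNNN") :
    pvBBody (l :: ls) = ([l], ls) := by
  simp only [pvBBody]; rw [if_neg hm, if_pos (by simp [hn])]

theorem pvBBody_plain (l : String) (ls : List String)
    (hm : ¬ PySem.Str.startswith (PySem.Str.strip l) "// [WARNING_ID:" = true)
    (hn : ¬ PySem.Str.strip l = "// NNNN") :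
    pvBBody (l :: ls) = (l :: (pvBBody ls).1, (pvBBody ls).2) := by
  simp only [pvBBody]; rw [if_neg hm, if_neg (by simp [hn])]

theorem pvBOuter_marker (l : String) (ls : List String) (s : PySem.Dict String (List String))
    (h : PySem.Str.startswith (PySem.Str.strip l) "// [WARNING_ID:" = true) :
    pvBOuter (l :: ls) s = pvBOuter (pvBBody ls).2
      (if (PySem.Str.strip (PySem.Str.replace
            (PySem.Str.replace (PySem.Str.strip l) "// [WARNING_ID:" "") "]" "")) != "" then
         s.insert (PySem.Str.strip (PySem.Str.replace
            (PySem.Str.replace (PySem.Str.strip l) "// [WARNING_ID:" "") "]" "")) (l :: (pvBBody ls).1)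
       else s) := by
  rw [pvBOuter]; rw [if_pos h]

theorem pvBOuter_skip (l : String) (ls : List String) (s : PySem.Dict String (List String))
    (h : ¬ PySem.Str.startswith (PySem.Str.strip l) "// [WARNING_ID:" = true) :
    pvBOuter (l :: ls) s = pvBOuter ls s := by
  rw [pvBOuter]; rw [if_neg h]

theorem pvMain (ls : List String) : ∀ (s : PySem.Dict String (List String)) (cw : String) (cl : List String),
    (pvAFinish (ls.foldl pvAStep (s, cw, cl, false)) = (pvBOuter ls s).items)
    ∧ (cl ≠ [] → pvAFinish (ls.foldl pvAStep (s, cw, cl, true)) =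
        (pvBOuter (pvBBody ls).2
          (if cw != "" then s.insert cw (cl ++ (pvBBody ls).1) else s)).items) := by
  induction ls with
  | nil =>
    intro s cw cl
    constructor
    · simp [pvAFinish, pvBOuter]
    · intro hcl
      simp [pvAFinish, pvBBody, pvBOuter]
      by_cases h : cw = "" <;> simp [h, hcl]
  | cons l ls ih =>
    intro s cw cl
    by_cases hm : PySem.Str.startswith (PySem.Str.strip l) "// [WARNING_ID:" = true
    · constructor
      · simp only [List.foldl_cons, pvAStep]
        rw [if_pos hm, if_neg (by simp)]
        rw [(ih _ _ _).2 (by simp)]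
        rw [pvBOuter_marker l ls s hm]
        simp
      · intro hcl
        simp only [List.foldl_cons, pvAStep]
        rw [if_pos hm]
        rw [(ih _ _ _).2 (by simp)]
        rw [pvBBody_marker l ls hm]
        rw [pvBOuter_marker l ls _ hm]
        have : (true && cw != "" && !cl.isEmpty) = (cw != "") := by
          cases h : (cw != "") <;> simp [hcl]
        rw [this]
        by_cases h : (cw != "") = true <;> simp [h]
    · by_cases hn : PySem.Str.strip l = "// NNNN"
      · constructor
        · simp only [List.foldl_cons, pvAStep]
          rw [if_neg hm, if_neg (by simp)]
          rw [(ih _ _ _).1]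
          rw [pvBOuter_skip l ls s hm]
        · intro _
          simp only [List.foldl_cons, pvAStep]
          rw [if_neg hm, if_pos trivial, if_pos (by simp [hn])]
          rw [(ih _ _ _).1]
          rw [pvBBody_nnnn l ls hm hn]
      · constructor
        · simp only [List.foldl_cons, pvAStep]
          rw [if_neg hm, if_neg (by simp)]
          rw [(ih _ _ _).1]
          rw [pvBOuter_skip l ls s hm]
        · intro _
          simp only [List.foldl_cons, pvAStep]
          rw [if_neg hm, if_pos trivial, if_neg (by simp [hn])]
          rw [(ih _ _ _).2 (by simp)]
          rw [pvBBody_plain l ls hm hn]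
          simp [List.append_assoc]

-- ===== VERDICT (by name: the statement is the Claim_ definition above) =====
theorem extract_warning_sections_py_spec : Claim_equal_extract_warning_sections_py := by
  intro lines _
  unfold Spec_extract_warning_sections_py extract_warning_sections_py extract_warning_sections_py_alt
  exact (pvMain lines PySem.Dict.empty "" []).1
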